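-- pv_equiv track=rewrite | github.com/KennethJefferson/cc_sdk_knowledge_extractor | skills/project-maker/scripts/project_maker.py | parse
-- ===== SOURCE A (Python) =====
-- def parse(content: str) -> str:
--     """Extract plain text from SRT content."""
--     lines = []
--     current_text = []
--
--     for line in content.split('\n'):
--         line = line.strip()
--
--         # Skip sequence numbers
--         if line.isdigit():
--             if current_text:
--                 lines.append(' '.join(current_text))
--                 current_text = []
--             continue
--
--         # Skip timestamps
--         if '-->' in line:
--             continue
--
--         # Skip empty lines
--         if not line:
--             if current_text:
--                 lines.append(' '.join(current_text))
--                 current_text = []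
--             continue
--
--         # Collect text
--         current_text.append(line)
--
--     if current_text:
--         lines.append(' '.join(current_text))
--
--     return '\n'.join(lines)
-- ===== SOURCE B (Python) =====
-- def parse(content: str) -> str:
--     """Extract plain text from SRT content: pre-filter timestamp lines, then group runs of text lines."""
--     stripped = [l.strip() for l in content.split('\n')]
--     kept = [l for l in stripped if '-->' not in l]
--
--     def is_text(l):
--         return bool(l) and not l.isdigit()
--
--     blocks = []
--     i, n = 0, len(kept)
--     while i < n:
--         l = kept[i]
--         i += 1
--         if not is_text(l):
--             continue
--         run = [l]
--         while i < n and is_text(kept[i]):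
--             run.append(kept[i])
--             i += 1
--         blocks.append(' '.join(run))
--     return '\n'.join(blocks)
-- ===== Notes on version B (the rewrite author's own statement) =====
-- stated objective: alternative
-- what changed: Replaces A's single stateful flush-on-separator loop (buffer joined and emitted whenever a digit/empty line or the end is hit) with a filter-then-group pipeline: strip all lines, pre-drop every '-->' timestamp line, then scan the remaining lines with two indices, emitting one space-joined block per maximal run of non-empty non-digit lines.
import Mathlib
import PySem

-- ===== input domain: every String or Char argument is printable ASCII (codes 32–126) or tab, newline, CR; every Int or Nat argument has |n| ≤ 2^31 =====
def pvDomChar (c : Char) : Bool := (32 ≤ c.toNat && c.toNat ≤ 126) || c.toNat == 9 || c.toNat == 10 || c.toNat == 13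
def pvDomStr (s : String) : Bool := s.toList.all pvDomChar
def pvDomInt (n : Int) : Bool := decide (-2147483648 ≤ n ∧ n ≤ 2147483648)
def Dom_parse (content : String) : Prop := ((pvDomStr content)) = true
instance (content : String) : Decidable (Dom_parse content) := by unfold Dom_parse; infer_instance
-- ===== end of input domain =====

-- B replaces A's flush-on-separator accumulator with a filter-then-group pipeline
-- (pre-drop '-->' lines, then scan runs of text lines); objective: alternative decomposition.

-- ===== PORT A =====
-- literal transliteration of A's single stateful loop; state = (lines, current_text);
-- '\n' ≠ "" so split? is some (getD [] is unreachable)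
def parse (content : String) : String :=
  let step := fun (st : List String × List String) (raw : String) =>
    let line := PySem.Str.strip raw
    if PySem.Str.strIsdigit line then
      if !st.2.isEmpty then (st.1 ++ [PySem.Str.join " " st.2], ([] : List String)) else st
    else if PySem.Str.isIn "-->" line then st
    else if line == "" then
      if !st.2.isEmpty then (st.1 ++ [PySem.Str.join " " st.2], ([] : List String)) else st
    else (st.1, st.2 ++ [line])
  let st := ((PySem.Str.split? content "\n").getD []).foldl step ([], [])
  let lines := if !st.2.isEmpty then st.1 ++ [PySem.Str.join " " st.2] else st.1
  PySem.Str.join "\n" lines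

-- ===== PORT B =====
-- B-side helper: is_text(l) = bool(l) and not l.isdigit()
def isTextB (l : String) : Bool := !(l == "") && !PySem.Str.strIsdigit l

-- inner while: extend the current run while the next line is text; returns (run-tail, next index)
def scanRun (kept : List String) (i : Nat) : List String × Nat :=
  if h : i < kept.length then
    if isTextB kept[i] then
      let r := scanRun kept (i + 1)
      (kept[i] :: r.1, r.2)
    else ([], i)
  else ([], i)
  termination_by kept.length - i

-- (needed by blocksFrom's termination, cited in its decreasing_by)
theorem scanRun_ge (kept : List String) (i : Nat) : i ≤ (scanRun kept i).2 := by
  unfold scanRun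
  split
  · split
    · have := scanRun_ge kept (i + 1)
      simpa using le_trans (Nat.le_succ i) this
    · simp
  · simp
  termination_by kept.length - i

-- outer while: skip separator lines, emit one block per run of text lines
def blocksFrom (kept : List String) (i : Nat) : List String :=
  if h : i < kept.length then
    if isTextB kept[i] then
      let r := scanRun kept (i + 1)
      PySem.Str.join " " (kept[i] :: r.1) :: blocksFrom kept r.2
    else blocksFrom kept (i + 1)
  else []
  termination_by kept.length - i
  decreasing_by
  · have := scanRun_ge kept (i + 1); omega
  · omega

-- literal transliteration of Source B: strip, pre-filter '-->' lines, group runs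
def parse_alt (content : String) : String :=
  let stripped := ((PySem.Str.split? content "\n").getD []).map PySem.Str.strip
  let kept := stripped.filter (fun l => !PySem.Str.isIn "-->" l)
  PySem.Str.join "\n" (blocksFrom kept 0)

-- ===== PRECONDITION & SPEC =====
def Spec_parse (content : String) (out : String) : Prop := out = parse_alt content
instance (content : String) (out : String) : Decidable (Spec_parse content out) := by unfold Spec_parse; infer_instance

-- ===== CLAIM (what is proved, stated in full; the proofs are below) =====
def Claim_equal_parse : Prop := ∀ (content : String), Dom_parse content → Spec_parse content (parse content)

-- ===== LEMMAS AND PROOFS =====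

-- proof-only: A's loop body after stripping and timestamp filtering
def stepA' (st : List String × List String) (l : String) : List String × List String :=
  if !isTextB l then
    if !st.2.isEmpty then (st.1 ++ [PySem.Str.join " " st.2], ([] : List String)) else st
  else (st.1, st.2 ++ [l])

def finalA (st : List String × List String) : List String :=
  if !st.2.isEmpty then st.1 ++ [PySem.Str.join " " st.2] else st.1

-- proof-only reference grouping: grpC cur ls = blocks produced from pending run cur and remaining lines ls
def grpC (cur : List String) : List String → List String
  | [] => if !cur.isEmpty then [PySem.Str.join " " cur] else []
  | l :: ls =>
    if !isTextB l then
      if !cur.isEmpty then PySem.Str.join " " cur :: grpC [] ls else grpC [] ls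
    else grpC (cur ++ [l]) ls

-- proof-only: A's loop body, named (identical to the lambda inside parse)
def stepA (st : List String × List String) (raw : String) : List String × List String :=
  let line := PySem.Str.strip raw
  if PySem.Str.strIsdigit line then
    if !st.2.isEmpty then (st.1 ++ [PySem.Str.join " " st.2], ([] : List String)) else st
  else if PySem.Str.isIn "-->" line then st
  else if line == "" then
    if !st.2.isEmpty then (st.1 ++ [PySem.Str.join " " st.2], ([] : List String)) else st
  else (st.1, st.2 ++ [line])

-- a line made of digits cannot contain "-->"
theorem isdigit_no_arrow (l : String) (h : PySem.Str.strIsdigit l = true) :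
    PySem.Str.isIn "-->" l = false := by
  rw [← Bool.not_eq_true, PySem.Str.isIn_iff_infix]
  intro hinf
  have hm : '-' ∈ l.toList := hinf.mem (by simp)
  have hd : PySem.Chars.strIsdigit l.toList = true := by simpa using h
  simp only [PySem.Chars.strIsdigit, Bool.and_eq_true, List.all_eq_true] at hd
  have := hd.2 '-' hm
  simp [PySem.Chars.isdigit] at this

-- one step of A's loop, when the stripped line is not a timestamp line
theorem stepA_ts (st : List String × List String) (raw : String)
    (hts : PySem.Str.isIn "-->" (PySem.Str.strip raw) = true) :
    stepA st raw = st := by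
  have hdig : PySem.Str.strIsdigit (PySem.Str.strip raw) = false := by
    cases hb : PySem.Str.strIsdigit (PySem.Str.strip raw)
    · rfl
    · rw [isdigit_no_arrow _ hb] at hts; exact absurd hts (by simp)
  have htsC : PySem.Chars.isIn ['-', '-', '>'] (PySem.Chars.strip raw.toList) = true := by
    simpa using hts
  have hdigC : PySem.Chars.strIsdigit (PySem.Chars.strip raw.toList) = false := by
    simpa using hdig
  simp [stepA, hdigC, htsC]

theorem stepA_eq (st : List String × List String) (raw : String)
    (hts : PySem.Str.isIn "-->" (PySem.Str.strip raw) = false) :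
    stepA st raw = stepA' st (PySem.Str.strip raw) := by
  simp only [stepA, stepA', isTextB]
  have htsC : PySem.Chars.isIn ['-', '-', '>'] (PySem.Chars.strip raw.toList) = false := by
    simpa using hts
  by_cases hdig : PySem.Str.strIsdigit (PySem.Str.strip raw) = true
  · have hne : (PySem.Str.strip raw == "") = false := by
      cases hb : (PySem.Str.strip raw == "") with
      | false => rfl
      | true =>
        have : PySem.Str.strip raw = "" := by simpa using hb
        rw [this] at hdig
        simp [PySem.Str.strIsdigit, PySem.Chars.strIsdigit] at hdig
    have hdigC : PySem.Chars.strIsdigit (PySem.Chars.strip raw.toList) = true := by simpa using hdig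
    have hneC : ¬ (PySem.Str.strip raw = "") := by simpa using hne
    simp [hdigC, hne]
  · have hdig' : PySem.Str.strIsdigit (PySem.Str.strip raw) = false := by
      cases hb : PySem.Str.strIsdigit (PySem.Str.strip raw)
      · rfl
      · exact absurd hb hdig
    have hdigC : PySem.Chars.strIsdigit (PySem.Chars.strip raw.toList) = false := by simpa using hdig'
    by_cases hemp : (PySem.Str.strip raw == "") = true
    · simp [hdigC, hemp, htsC]
    · have hemp' : (PySem.Str.strip raw == "") = false := by
        cases hb : (PySem.Str.strip raw == "")
        · rfl
        · exact absurd hb hemp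
      simp [hdigC, hemp', htsC]

-- A's loop over raw lines = stepA' over the stripped-and-filtered lines
theorem foldA_filter (ls : List String) (st : List String × List String) :
    ls.foldl stepA st
    = ((ls.map PySem.Str.strip).filter (fun l => !PySem.Str.isIn "-->" l)).foldl stepA' st := by
  induction ls generalizing st with
  | nil => rfl
  | cons raw rest ih =>
    simp only [List.foldl_cons, List.map_cons, List.filter_cons]
    by_cases hts : PySem.Str.isIn "-->" (PySem.Str.strip raw) = true
    · rw [stepA_ts st raw hts]
      simp only [hts, Bool.not_true, Bool.false_eq_true, if_false]
      exact ih st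
    · have hts' : PySem.Str.isIn "-->" (PySem.Str.strip raw) = false := by simpa using hts
      simp only [hts', Bool.not_false, if_true, List.foldl_cons]
      rw [stepA_eq st raw hts']
      exact ih (stepA' st (PySem.Str.strip raw))

-- the stepA' fold + final flush computes grpC
theorem finalA_foldA' (ls : List String) (lines cur : List String) :
    finalA (ls.foldl stepA' (lines, cur)) = lines ++ grpC cur ls := by
  induction ls generalizing lines cur with
  | nil =>
    simp only [List.foldl_nil, finalA, grpC]
    cases cur <;> simp
  | cons l rest ih =>
    simp only [List.foldl_cons, grpC, stepA']
    by_cases ht : isTextB l = true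
    · simp only [ht, Bool.not_true, Bool.false_eq_true, if_false]
      rw [ih]
    · have ht' : isTextB l = false := by simpa using ht
      simp only [ht', Bool.not_false, if_true]
      cases cur with
      | nil => simp [ih]
      | cons c cs =>
        simp only [List.isEmpty_cons, Bool.not_false, if_true]
        rw [ih]
        simp

-- scanRun eats exactly the text run that grpC appends to a pending block
theorem grpC_scanRun (kept : List String) (i : Nat) (cur : List String) (hc : cur ≠ []) :
    grpC cur (kept.drop i)
      = PySem.Str.join " " (cur ++ (scanRun kept i).1) :: grpC [] (kept.drop (scanRun kept i).2) := by
  rcases Nat.lt_or_ge i kept.length with h | h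
  · rw [List.drop_eq_getElem_cons h]
    by_cases ht : isTextB kept[i] = true
    · rw [scanRun]
      simp only [h, dif_pos, ht, if_true]
      simp only [grpC, ht, Bool.not_true, Bool.false_eq_true, if_false]
      rw [grpC_scanRun kept (i + 1) (cur ++ [kept[i]]) (by simp)]
      simp
    · have ht' : isTextB kept[i] = false := by simpa using ht
      rw [scanRun]
      simp only [h, dif_pos, ht', Bool.false_eq_true, if_false]
      have hcur : (!cur.isEmpty) = true := by simpa using hc
      simp only [grpC, ht', Bool.not_false, if_true, hcur, List.append_nil]
      congr 1
      rw [List.drop_eq_getElem_cons h]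
      simp [grpC, ht']
  · have hd : kept.drop i = [] := List.drop_eq_nil_of_le h
    rw [scanRun]
    rw [dif_neg (Nat.not_lt.mpr h)]
    have hcur : (!cur.isEmpty) = true := by simpa using hc
    simp [hd, grpC, hcur]
  termination_by kept.length - i

-- B's index loop computes grpC from an empty pending run
theorem blocksFrom_eq_grpC (kept : List String) (i : Nat) :
    blocksFrom kept i = grpC [] (kept.drop i) := by
  rcases Nat.lt_or_ge i kept.length with h | h
  · rw [List.drop_eq_getElem_cons h]
    by_cases ht : isTextB kept[i] = true
    · rw [blocksFrom]
      simp only [h, dif_pos, ht, if_true]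
      simp only [grpC, ht, Bool.not_true, Bool.false_eq_true, if_false]
      rw [grpC_scanRun kept (i + 1) ([] ++ [kept[i]]) (by simp)]
      rw [blocksFrom_eq_grpC kept (scanRun kept (i + 1)).2]
      simp
    · have ht' : isTextB kept[i] = false := by simpa using ht
      rw [blocksFrom]
      simp only [h, dif_pos, ht', Bool.false_eq_true, if_false]
      simp only [grpC, ht', Bool.not_false, if_true]
      exact blocksFrom_eq_grpC kept (i + 1)
  · rw [blocksFrom, dif_neg (Nat.not_lt.mpr h)]
    simp [List.drop_eq_nil_of_le h, grpC]
  termination_by kept.length - i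
  decreasing_by
  · have := scanRun_ge kept (i + 1); omega
  · omega

-- ===== VERDICT (by name: the statement is the Claim_ definition above) =====
theorem parse_spec : Claim_equal_parse := by
  intro content _
  unfold Spec_parse
  show parse content = parse_alt content
  have hA : parse content
      = PySem.Str.join "\n"
          (finalA (((PySem.Str.split? content "\n").getD []).foldl stepA ([], []))) := rfl
  have hB : parse_alt content
      = PySem.Str.join "\n"
          (blocksFrom ((((PySem.Str.split? content "\n").getD []).map PySem.Str.strip).filter
            (fun l => !PySem.Str.isIn "-->" l)) 0) := rfl
  rw [hA, hB, foldA_filter, blocksFrom_eq_grpC, List.drop_zero, finalA_foldA']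
  simp
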